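-- pv_equiv track=rewrite | github.com/Arccosecantism/ProjectEuler | Problem24.py | avoidCollisions
-- ===== SOURCE A (Python) =====
-- def avoidCollisions(dnum, ar):
-- 	#kind of hard to explain: takes [2200], returns [2301] -- [0,1,*2,3], [0,1,*3], [*0,1], [*1]
-- 	#moves the numbers up and down to avoid being the same as a previous number
-- 	dar = []
-- 	for i in range(0,dnum):
-- 		dar.append([i,0])
-- 	retar = []
-- 	for i in range(0,len(ar)):
-- 		ctr = 0
-- 		indx = 0
-- 		set = 0
-- 		for k in range(0,len(dar)):
-- 			if dar[k][1] == 0: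
-- 				ctr += 1
-- 			if ctr == ar[i] + 1 and set == 0:
-- 				indx = k
-- 				set = 1
-- 				dar[k][1] = 1
-- 		retar.append(indx)
-- 	return retar
-- ===== SOURCE B (Python) =====
-- def avoidCollisions(dnum, ar):
--     # keep the still-free slot indices in order; the (a+1)-th unused slot is free[a]
--     free = list(range(dnum))
--     ret = []
--     for a in ar:
--         if 0 <= a < len(free):
--             ret.append(free.pop(a))
--         else:
--             ret.append(0)
--     return ret
-- ===== Notes on version B (the rewrite author's own statement) =====
-- stated objective: faster
-- what changed: A scans a whole [index,flag] table counting unused entries to locate the k-th free slot and marks it; B keeps the still-free indices in a plain list, so the k-th free slot is free[k] and marking it used is a single free.pop(k), removing the inner counting scan.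
import Mathlib
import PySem

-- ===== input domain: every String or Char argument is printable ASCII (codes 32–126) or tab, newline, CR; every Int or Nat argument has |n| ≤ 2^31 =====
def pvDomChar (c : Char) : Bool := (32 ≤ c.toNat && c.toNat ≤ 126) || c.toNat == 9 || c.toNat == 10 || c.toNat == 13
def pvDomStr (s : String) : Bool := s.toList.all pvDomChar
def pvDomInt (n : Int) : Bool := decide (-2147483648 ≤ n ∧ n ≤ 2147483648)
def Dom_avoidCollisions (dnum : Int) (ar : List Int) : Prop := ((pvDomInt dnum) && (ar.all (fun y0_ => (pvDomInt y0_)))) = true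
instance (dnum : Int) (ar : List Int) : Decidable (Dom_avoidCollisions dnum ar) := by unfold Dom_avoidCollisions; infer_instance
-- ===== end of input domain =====

-- B replaces A's flag-table scan by a list of still-free indices (pop the a-th); objective: simpler.

-- ===== PORT A =====
-- inner loop 'for k in range(0,len(dar))': structural recursion over dar carrying
-- the same state (ctr, indx, set) plus the running position k; dar[k][1] = 1 is the
-- rebuilt entry (v, 1).  Returns (indx, updated dar).
def acInner (a : Int) (k ctr indx set : Int) : List (Int × Int) → Int × List (Int × Int)
  | [] => (indx, [])
  | (v, f) :: rest =>
    let ctr' := if f = 0 then ctr + 1 else ctr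
    if ctr' = a + 1 ∧ set = 0 then
      let r := acInner a (k + 1) ctr' k 1 rest
      (r.1, (v, 1) :: r.2)
    else
      let r := acInner a (k + 1) ctr' indx set rest
      (r.1, (v, f) :: r.2)

-- outer loop 'for i in range(0,len(ar))': fold over ar, threading dar, appending indx
def acOuter (dar : List (Int × Int)) : List Int → List Int
  | [] => []
  | a :: rest =>
    let r := acInner a 0 0 0 0 dar
    r.1 :: acOuter r.2 rest

def avoidCollisions (dnum : Int) (ar : List Int) : List Int :=
  acOuter ((PySem.List.pyRange 0 dnum 1).map (fun i => (i, 0))) ar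

-- ===== PORT B =====
-- loop of Source B: thread the free-index list; free.pop(a) via PySem.List.pop?
def acFree (free : List Int) : List Int → List Int
  | [] => []
  | a :: rest =>
    if 0 ≤ a ∧ a < (free.length : Int) then
      match PySem.List.pop? free a with
      | some (v, free') => v :: acFree free' rest
      | none => []   -- unreachable: guard ensures pop? = some
    else
      0 :: acFree free rest

def avoidCollisions_alt (dnum : Int) (ar : List Int) : List Int :=
  acFree (PySem.List.pyRange 0 dnum 1) ar

-- ===== PRECONDITION & SPEC =====
def Spec_avoidCollisions (dnum : Int) (ar : List Int) (out : List Int) : Prop := out = avoidCollisions_alt dnum ar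
instance (dnum : Int) (ar : List Int) (out : List Int) : Decidable (Spec_avoidCollisions dnum ar out) := by unfold Spec_avoidCollisions; infer_instance

-- ===== CLAIM (what is proved, stated in full; the proofs are below) =====
def Claim_equal_avoidCollisions : Prop := ∀ (dnum : Int) (ar : List Int), Dom_avoidCollisions dnum ar → Spec_avoidCollisions dnum ar (avoidCollisions dnum ar)

-- ===== LEMMAS AND PROOFS =====

-- the free slots of a flag table, in order
def freeOf (dar : List (Int × Int)) : List Int :=
  (dar.filter (fun p => p.2 == 0)).map Prod.fst

-- every flag is 0 or 1
def flags01 (dar : List (Int × Int)) : Prop := ∀ p ∈ dar, p.2 = 0 ∨ p.2 = 1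

-- first components are consecutive positions starting at k
def posOk (k : Int) : List (Int × Int) → Prop
  | [] => True
  | (v, _) :: rest => v = k ∧ posOk (k + 1) rest

-- one inner-loop step, free head
theorem acInner_step0 (a k ctr indx set v : Int) (rest : List (Int × Int)) :
    acInner a k ctr indx set ((v, (0:Int)) :: rest) =
      (if ctr + 1 = a + 1 ∧ set = 0 then
        ((acInner a (k+1) (ctr+1) k 1 rest).1, (v, 1) :: (acInner a (k+1) (ctr+1) k 1 rest).2)
      else
        ((acInner a (k+1) (ctr+1) indx set rest).1, (v, 0) :: (acInner a (k+1) (ctr+1) indx set rest).2)) := by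
  simp [acInner]

-- one inner-loop step, flagged head
theorem acInner_step1 (a k ctr indx set v f : Int) (rest : List (Int × Int)) (hf : ¬ f = 0) :
    acInner a k ctr indx set ((v, f) :: rest) =
      (if ctr = a + 1 ∧ set = 0 then
        ((acInner a (k+1) ctr k 1 rest).1, (v, 1) :: (acInner a (k+1) ctr k 1 rest).2)
      else
        ((acInner a (k+1) ctr indx set rest).1, (v, f) :: (acInner a (k+1) ctr indx set rest).2)) := by
  simp [acInner, hf]

-- set = 1: the inner loop is inert
theorem acInner_set1 (a : Int) : ∀ (dar : List (Int × Int)) (k ctr indx : Int),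
    acInner a k ctr indx 1 dar = (indx, dar) := by
  intro dar
  induction dar with
  | nil => intro k ctr indx; rfl
  | cons hd tl ih =>
    intro k ctr indx
    obtain ⟨v, f⟩ := hd
    by_cases hf : f = 0
    · subst hf; rw [acInner_step0, if_neg (by simp), ih]
    · rw [acInner_step1 _ _ _ _ _ _ _ _ hf, if_neg (by simp), ih]

-- counter already past the target: the inner loop is inert
theorem acInner_past (a : Int) : ∀ (dar : List (Int × Int)) (k ctr indx : Int),
    a + 1 < ctr → acInner a k ctr indx 0 dar = (indx, dar) := by
  intro dar
  induction dar with
  | nil => intro k ctr indx _; rfl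
  | cons hd tl ih =>
    intro k ctr indx h
    obtain ⟨v, f⟩ := hd
    by_cases hf : f = 0
    · subst hf; rw [acInner_step0, if_neg (by omega), ih _ _ _ (by omega)]
    · rw [acInner_step1 _ _ _ _ _ _ _ _ hf, if_neg (by omega), ih _ _ _ h]

-- not enough free slots left: the inner loop is inert
theorem acInner_short (a : Int) : ∀ (dar : List (Int × Int)) (k ctr indx : Int),
    ctr ≤ a → ((freeOf dar).length : Int) ≤ a - ctr →
    acInner a k ctr indx 0 dar = (indx, dar) := by
  intro dar
  induction dar with
  | nil => intro k ctr indx _ _; rfl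
  | cons hd tl ih =>
    intro k ctr indx hle hlen
    obtain ⟨v, f⟩ := hd
    by_cases hf : f = 0
    · subst hf
      have hlen' : ((freeOf tl).length : Int) ≤ a - (ctr + 1) := by
        simp [freeOf] at hlen ⊢; omega
      rw [acInner_step0, if_neg (by omega), ih _ _ _ (by omega) hlen']
    · have hlen' : ((freeOf tl).length : Int) ≤ a - ctr := by
        simp [freeOf, hf] at hlen ⊢; omega
      rw [acInner_step1 _ _ _ _ _ _ _ _ hf, if_neg (by omega), ih _ _ _ hle hlen']

-- main case: the (a - ctr)-th remaining free slot exists; the loop returns its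
-- position and flags exactly it
theorem acInner_hit (a : Int) : ∀ (dar : List (Int × Int)) (k ctr indx : Int),
    ctr ≤ a → (a - ctr) < ((freeOf dar).length : Int) →
    flags01 dar → posOk k dar →
    ∃ dar',
      acInner a k ctr indx 0 dar = ((freeOf dar).getD (a - ctr).toNat 0, dar') ∧
      freeOf dar' = (freeOf dar).eraseIdx (a - ctr).toNat ∧
      flags01 dar' ∧ posOk k dar' := by
  intro dar
  induction dar with
  | nil => intro k ctr indx _ hlt _ _; simp [freeOf] at hlt; omega
  | cons hd tl ih =>
    intro k ctr indx hle hlt hfl hpos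
    obtain ⟨v, f⟩ := hd
    have hf01 := hfl (v, f) (by simp)
    obtain ⟨hv, hpos'⟩ := hpos
    have hfl' : flags01 tl := fun p hp => hfl p (by simp [hp])
    rcases hf01 with hf | hf
    · -- free head
      subst hf
      have hfree : freeOf ((v, (0:Int)) :: tl) = v :: freeOf tl := by simp [freeOf]
      by_cases hctr : ctr = a
      · -- this is the slot
        subst hctr
        refine ⟨(v, 1) :: tl, ?_, ?_, ?_, ?_⟩
        · rw [acInner_step0, if_pos ⟨rfl, rfl⟩, acInner_set1]
          simp [freeOf, hv]
        · simp [freeOf]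
        · intro p hp
          rcases List.mem_cons.mp hp with h | h
          · subst h; right; rfl
          · exact hfl' p h
        · exact ⟨hv, hpos'⟩
      · -- keep scanning
        have hlt' : a - (ctr + 1) < ((freeOf tl).length : Int) := by
          rw [hfree] at hlt; simp at hlt; omega
        obtain ⟨dar', he, hfr, hfl'', hpos''⟩ :=
          ih (k + 1) (ctr + 1) indx (by omega) hlt' hfl' hpos'
        refine ⟨(v, 0) :: dar', ?_, ?_, ?_, ?_⟩
        · rw [acInner_step0, if_neg (by omega), he]
          have hnat : (a - ctr).toNat = (a - (ctr + 1)).toNat + 1 := by omega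
          simp [hfree, hnat]
        · have hnat : (a - ctr).toNat = (a - (ctr + 1)).toNat + 1 := by omega
          simp [freeOf, hnat] at hfr ⊢
          simpa [freeOf] using hfr
        · intro p hp
          rcases List.mem_cons.mp hp with h | h
          · subst h; left; rfl
          · exact hfl'' p h
        · exact ⟨hv, hpos''⟩
    · -- flagged head
      subst hf
      have hfree : freeOf ((v, (1:Int)) :: tl) = freeOf tl := by simp [freeOf]
      have hlt' : a - ctr < ((freeOf tl).length : Int) := by rwa [hfree] at hlt
      obtain ⟨dar', he, hfr, hfl'', hpos''⟩ :=
        ih (k + 1) ctr indx hle hlt' hfl' hpos'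
      refine ⟨(v, 1) :: dar', ?_, ?_, ?_, ?_⟩
      · rw [acInner_step1 _ _ _ _ _ _ _ _ (by norm_num), if_neg (by omega), he]
        simp [hfree]
      · simp [freeOf] at hfr ⊢; simpa [freeOf] using hfr
      · intro p hp
        rcases List.mem_cons.mp hp with h | h
        · subst h; right; rfl
        · exact hfl'' p h
      · exact ⟨hv, hpos''⟩

-- a = -1: A marks (a no-op) or skips; either way returns 0 and leaves dar unchanged
theorem acInner_neg_one (dar : List (Int × Int)) (hfl : flags01 dar) :
    acInner (-1) 0 0 0 0 dar = (0, dar) := by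
  cases dar with
  | nil => rfl
  | cons hd tl =>
    obtain ⟨v, f⟩ := hd
    have hf01 := hfl (v, f) (by simp)
    rcases hf01 with hf | hf
    · subst hf
      rw [acInner_step0, if_neg (by omega), acInner_past _ _ _ _ _ (by omega)]
    · subst hf
      rw [acInner_step1 _ _ _ _ _ _ _ _ (by norm_num), if_pos (by norm_num), acInner_set1]

-- the outer loops agree whenever dar is a well-formed flag table for free
theorem acOuter_eq_acFree : ∀ (ar : List Int) (dar : List (Int × Int)),
    flags01 dar → posOk 0 dar → acOuter dar ar = acFree (freeOf dar) ar := by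
  intro ar
  induction ar with
  | nil => intro dar _ _; rfl
  | cons a rest ih =>
    intro dar hfl hpos
    by_cases hin : 0 ≤ a ∧ a < ((freeOf dar).length : Int)
    · obtain ⟨ha0, halen⟩ := hin
      obtain ⟨n, rfl⟩ := Int.eq_ofNat_of_zero_le ha0
      obtain ⟨dar', he, hfr, hfl', hpos'⟩ :=
        acInner_hit n dar 0 0 0 (by omega) (by omega) hfl hpos
      have hlt : n < (freeOf dar).length := by omega
      have hnat : ((n : Int) - 0).toNat = n := by omega
      rw [hnat] at he hfr
      have hpop : PySem.List.pop? (freeOf dar) (n : Int) =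
          some ((freeOf dar)[n], (freeOf dar).eraseIdx n) :=
        PySem.List.pop?_natCast (freeOf dar) n hlt
      simp only [acOuter, acFree]
      rw [if_pos ⟨by omega, by simpa using halen⟩, hpop, he]
      simp only
      rw [ih dar' hfl' hpos', hfr]
      congr 1
      exact List.getD_eq_getElem _ _ hlt
    · -- no slot is taken: A returns 0 and leaves dar unchanged
      have hmiss : acInner a 0 0 0 0 dar = (0, dar) := by
        rcases lt_trichotomy a (-1) with h | h | h
        · exact acInner_past a dar 0 0 0 (by omega)
        · subst h; exact acInner_neg_one dar hfl
        · have ha0 : 0 ≤ a := by omega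
          have : ((freeOf dar).length : Int) ≤ a := by omega
          exact acInner_short a dar 0 0 0 ha0 (by omega)
      simp only [acOuter, acFree]
      rw [hmiss, if_neg (by simpa using hin)]
      simp only
      rw [ih dar hfl hpos]

theorem freeOf_map (xs : List Int) : freeOf (xs.map (fun i => (i, (0:Int)))) = xs := by
  induction xs with
  | nil => rfl
  | cons x xs ih => simp [freeOf] at ih ⊢; exact ih

theorem flags01_map (xs : List Int) : flags01 (xs.map (fun i => (i, (0:Int)))) := by
  intro p hp
  simp at hp
  obtain ⟨x, hx1, hx⟩ := hp
  subst hx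
  left; rfl

theorem posOk_range (n : Nat) : ∀ (a : Int),
    posOk a ((PySem.List.pyRange a (a + n) 1).map (fun i => (i, (0:Int)))) := by
  induction n with
  | zero => intro a; rw [PySem.List.pyRange_one_eq_nil (by omega)]; trivial
  | succ m ih =>
    intro a
    rw [PySem.List.pyRange_one_cons (by omega)]
    refine ⟨rfl, ?_⟩
    have := ih (a + 1)
    have harith : a + 1 + (m : Int) = a + ((m : Nat) + 1 : Nat) := by push_cast; ring
    rwa [harith] at this

theorem posOk_init (dnum : Int) :
    posOk 0 ((PySem.List.pyRange 0 dnum 1).map (fun i => (i, (0:Int)))) := by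
  by_cases h : dnum ≤ 0
  · rw [PySem.List.pyRange_one_eq_nil h]; trivial
  · have hd : dnum = (0 : Int) + (dnum.toNat : Nat) := by omega
    rw [hd]; exact posOk_range dnum.toNat 0

-- ===== VERDICT (by name: the statement is the Claim_ definition above) =====
theorem avoidCollisions_spec : Claim_equal_avoidCollisions := by
  intro dnum ar _
  unfold Spec_avoidCollisions avoidCollisions avoidCollisions_alt
  rw [acOuter_eq_acFree ar _ (flags01_map _) (posOk_init dnum), freeOf_map]
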